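-- pv_equiv track=rewrite | github.com/Chrisyhjiang/visa-assessor | app/services/assessment.py | _is_critical_employment
-- ===== SOURCE A (Python) =====
-- from typing import Dict, List, Any, Optional, Tuple
--
-- def _is_critical_employment(evidence: List[str]) -> bool:
--     """
--     Check if evidence contains critical employment categories.
--
--     Args:
--         evidence: List of evidence strings
--
--     Returns:
--         True if evidence contains critical employment, False otherwise
--     """
--     # Define critical employment categories
--     government_keywords = ["government", "federal", "state", "public service", "civil service", "agency", "department of", "ministry of"]
--     military_keywords = ["military", "army", "navy", "air force", "marine", "defense", "defence", "armed forces", "national guard", "coast guard"]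
--     stem_keywords = ["scientist", "engineer", "researcher", "developer", "programmer", "technologist", "mathematician", "data scientist",
--                     "ai", "artificial intelligence", "machine learning", "computer science", "physics", "chemistry", "biology",
--                     "technology", "technical", "engineering", "research", "development", "r&d", "laboratory", "lab"]
--
--     for item in evidence:
--         item_lower = item.lower()
--
--         # Check for government positions
--         if any(keyword in item_lower for keyword in government_keywords):
--             return True
--
--         # Check for military positions
--         if any(keyword in item_lower for keyword in military_keywords):
--             return True
--
--         # Check for STEM positions
--         if any(keyword in item_lower for keyword in stem_keywords):
--             return True
--
--     return False
-- ===== SOURCE B (Python) =====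
-- from typing import List
--
-- _ALL_KEYWORDS = (
--     "government", "federal", "state", "public service", "civil service", "agency",
--     "department of", "ministry of",
--     "military", "army", "navy", "air force", "marine", "defense", "defence",
--     "armed forces", "national guard", "coast guard",
--     "scientist", "engineer", "researcher", "developer", "programmer", "technologist",
--     "mathematician", "data scientist", "ai", "artificial intelligence",
--     "machine learning", "computer science", "physics", "chemistry", "biology",
--     "technology", "technical", "engineering", "research", "development", "r&d",
--     "laboratory", "lab",
-- )
--
-- def _is_critical_employment(evidence: List[str]) -> bool:
--     # One lowered text with a '\n' separator (no keyword contains '\n', so no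
--     # match can span two evidence items); one substring scan per keyword.
--     text = "\n".join(evidence).lower()
--     return any(kw in text for kw in _ALL_KEYWORDS)
-- ===== Notes on version B (the rewrite author's own statement) =====
-- stated objective: faster
-- what changed: Instead of looping over evidence items, lowering each and running three per-item any() scans over three keyword lists, B joins all evidence into one lowered text with a '\n' separator (which no keyword contains) and does a single any() over one flat keyword tuple, one C-level substring search per keyword over the combined text.
import Mathlib
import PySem

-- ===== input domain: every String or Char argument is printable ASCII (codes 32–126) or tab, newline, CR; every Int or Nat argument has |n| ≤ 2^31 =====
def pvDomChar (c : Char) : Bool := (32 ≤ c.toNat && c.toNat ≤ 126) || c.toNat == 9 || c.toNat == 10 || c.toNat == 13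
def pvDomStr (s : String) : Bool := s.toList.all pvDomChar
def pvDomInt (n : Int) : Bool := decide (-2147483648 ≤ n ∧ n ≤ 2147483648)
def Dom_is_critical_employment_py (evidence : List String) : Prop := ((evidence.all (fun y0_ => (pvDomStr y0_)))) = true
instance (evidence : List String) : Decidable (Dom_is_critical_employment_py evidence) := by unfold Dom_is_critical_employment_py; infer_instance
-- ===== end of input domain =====

-- B replaces A's per-item loop with three inner keyword scans by one lowered
-- '\n'-joined text and a single scan over one flat keyword list (measured
-- constant-factor speedup in a timing run).

-- ===== PORT A =====
def pvGov : List String := ["government", "federal", "state", "public service", "civil service", "agency", "department of", "ministry of"]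
def pvMil : List String := ["military", "army", "navy", "air force", "marine", "defense", "defence", "armed forces", "national guard", "coast guard"]
def pvStem : List String := ["scientist", "engineer", "researcher", "developer", "programmer", "technologist", "mathematician", "data scientist",
    "ai", "artificial intelligence", "machine learning", "computer science", "physics", "chemistry", "biology",
    "technology", "technical", "engineering", "research", "development", "r&d", "laboratory", "lab"]

def pvALoop : List String → Bool
  | [] => false
  | item :: rest =>
    let item_lower := PySem.Str.lower item
    if pvGov.any (fun kw => PySem.Str.isIn kw item_lower) then true
    else if pvMil.any (fun kw => PySem.Str.isIn kw item_lower) then true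
    else if pvStem.any (fun kw => PySem.Str.isIn kw item_lower) then true
    else pvALoop rest

def is_critical_employment_py (evidence : List String) : Bool := pvALoop evidence

-- ===== PORT B =====
def pvAllKeywords : List String :=
  ["government", "federal", "state", "public service", "civil service", "agency",
   "department of", "ministry of",
   "military", "army", "navy", "air force", "marine", "defense", "defence",
   "armed forces", "national guard", "coast guard",
   "scientist", "engineer", "researcher", "developer", "programmer", "technologist",
   "mathematician", "data scientist", "ai", "artificial intelligence",
   "machine learning", "computer science", "physics", "chemistry", "biology",
   "technology", "technical", "engineering", "research", "development", "r&d",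
   "laboratory", "lab"]

def is_critical_employment_py_alt (evidence : List String) : Bool :=
  let text := PySem.Str.lower (PySem.Str.join "\n" evidence)
  pvAllKeywords.any (fun kw => PySem.Str.isIn kw text)

-- ===== PRECONDITION & SPEC =====
def Spec_is_critical_employment_py (evidence : List String) (out : Bool) : Prop := out = is_critical_employment_py_alt evidence
instance (evidence : List String) (out : Bool) : Decidable (Spec_is_critical_employment_py evidence out) := by unfold Spec_is_critical_employment_py; infer_instance

-- ===== CLAIM (what is proved, stated in full; the proofs are below) =====
def Claim_equal_is_critical_employment_py : Prop := ∀ (evidence : List String), Dom_is_critical_employment_py evidence → Spec_is_critical_employment_py evidence (is_critical_employment_py evidence)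

-- ===== LEMMAS AND PROOFS =====

-- a keyword without c cannot reach across the separator c: prefix version
lemma pv_prefix_append_cons {kw a b : List Char} {c : Char} (hc : c ∉ kw) :
    kw <+: (a ++ c :: b) ↔ kw <+: a := by
  constructor
  · rintro ⟨t, ht⟩
    by_cases hle : kw.length ≤ a.length
    · have : kw = a.take kw.length := by
        have h1 : (kw ++ t).take kw.length = kw := List.take_left' rfl
        rw [ht] at h1
        rw [List.take_append_of_le_length hle] at h1
        exact h1.symm
      rw [this]; exact List.take_prefix _ _
    · exfalso
      have hlt : a.length < kw.length := by omega
      have hkw_eq : kw = (a ++ c :: b).take kw.length := by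
        rw [← ht]; exact (List.take_left' rfl).symm
      have hmem : c ∈ kw := by
        rw [hkw_eq, List.take_append, List.take_of_length_le (by omega)]
        have h2 : kw.length - a.length = (kw.length - a.length - 1) + 1 := by omega
        rw [h2, List.take_succ_cons]
        simp
      exact hc hmem
  · intro h
    exact h.trans (List.prefix_append _ _)

-- a keyword without c is an infix of a ++ c :: b iff it is an infix of a side
lemma pv_infix_append_cons {kw : List Char} {c : Char} (hc : c ∉ kw) :
    ∀ (a b : List Char), (kw <:+: (a ++ c :: b) ↔ kw <:+: a ∨ kw <:+: b)
  | [], b => by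
    simp only [List.nil_append, List.infix_cons_iff, List.infix_nil]
    constructor
    · rintro (hp | hb)
      · left
        have : kw <+: ([] : List Char) := (pv_prefix_append_cons (a := []) hc).mp hp
        simpa using this
      · right; exact hb
    · rintro (rfl | hb)
      · left; exact List.nil_prefix
      · right; exact hb
  | x :: a', b => by
    rw [List.cons_append, List.infix_cons_iff, pv_infix_append_cons hc a' b]
    have hpfx : kw <+: x :: (a' ++ c :: b) ↔ kw <+: x :: a' := by
      have := pv_prefix_append_cons (a := x :: a') (b := b) hc
      simpa using this
    rw [hpfx, ← or_assoc, ← List.infix_cons_iff]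

-- a nonempty keyword without '\n' is in the '\n'-join iff it is in some part
lemma pv_infix_join {kw : List Char} (hk : kw ≠ []) (hc : '\n' ∉ kw) :
    ∀ (parts : List (List Char)),
      (kw <:+: PySem.Chars.join ['\n'] parts ↔ ∃ p ∈ parts, kw <:+: p)
  | [] => by simp [PySem.Chars.join_nil, List.infix_nil, hk]
  | [p] => by simp [PySem.Chars.join_singleton]
  | p :: q :: rest => by
    rw [PySem.Chars.join_cons_cons]
    have : p ++ ['\n'] ++ PySem.Chars.join ['\n'] (q :: rest)
         = p ++ '\n' :: PySem.Chars.join ['\n'] (q :: rest) := by simp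
    rw [this, pv_infix_append_cons hc, pv_infix_join hk hc (q :: rest)]
    simp

-- lowering commutes with the '\n'-join ('\n' lowers to itself)
lemma pv_lower_join : ∀ (parts : List (List Char)),
    PySem.Chars.lower (PySem.Chars.join ['\n'] parts)
      = PySem.Chars.join ['\n'] (parts.map PySem.Chars.lower)
  | [] => by simp [PySem.Chars.join_nil, PySem.Chars.lower]
  | [p] => by simp [PySem.Chars.join_singleton]
  | p :: q :: rest => by
    have ih := pv_lower_join (q :: rest)
    simp only [List.map_cons] at ih
    simp only [PySem.Chars.join_cons_cons, List.map_cons]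
    rw [← ih]
    simp [PySem.Chars.lower, show PySem.Chars.lowerChar '\n' = '\n' from rfl]

-- A's loop is the any over items of the any over the flat keyword list
lemma pv_aloop_eq : ∀ (evidence : List String),
    pvALoop evidence
      = evidence.any (fun item =>
          pvAllKeywords.any (fun kw => PySem.Str.isIn kw (PySem.Str.lower item)))
  | [] => rfl
  | item :: rest => by
    have hsplit : pvAllKeywords = pvGov ++ pvMil ++ pvStem := by decide
    rw [List.any_cons, ← pv_aloop_eq rest]
    simp only [pvALoop, hsplit, List.any_append]
    cases hg : pvGov.any (fun kw => PySem.Str.isIn kw (PySem.Str.lower item)) <;>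
      cases hm : pvMil.any (fun kw => PySem.Str.isIn kw (PySem.Str.lower item)) <;>
      cases hs : pvStem.any (fun kw => PySem.Str.isIn kw (PySem.Str.lower item)) <;>
      simp

-- keyword membership in the lowered join, stated for the Str wrappers
lemma pv_isIn_text (kw : String) (hkw : kw.toList ≠ [] ∧ '\n' ∉ kw.toList)
    (evidence : List String) :
    PySem.Str.isIn kw (PySem.Str.lower (PySem.Str.join "\n" evidence)) = true
      ↔ ∃ item ∈ evidence, PySem.Str.isIn kw (PySem.Str.lower item) = true := by
  rw [PySem.Str.isIn_iff_infix, PySem.Str.toList_lower, PySem.Str.toList_join]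
  have hsep : ("\n" : String).toList = ['\n'] := rfl
  rw [hsep, pv_lower_join, pv_infix_join hkw.1 hkw.2]
  constructor
  · rintro ⟨p, hp, hinf⟩
    rw [List.mem_map] at hp
    obtain ⟨q, hq, rfl⟩ := hp
    rw [List.mem_map] at hq
    obtain ⟨item, hitem, rfl⟩ := hq
    exact ⟨item, hitem, by rw [PySem.Str.isIn_iff_infix, PySem.Str.toList_lower]; exact hinf⟩
  · rintro ⟨item, hitem, hin⟩
    refine ⟨PySem.Chars.lower item.toList, ?_, ?_⟩
    · simp only [List.map_map, List.mem_map]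
      exact ⟨item, hitem, rfl⟩
    · rw [PySem.Str.isIn_iff_infix, PySem.Str.toList_lower] at hin
      exact hin

lemma pv_all_keywords_ok :
    ∀ kw ∈ pvAllKeywords, kw.toList ≠ [] ∧ '\n' ∉ kw.toList := by decide

-- ===== VERDICT (by name: the statement is the Claim_ definition above) =====
theorem is_critical_employment_py_spec : Claim_equal_is_critical_employment_py := by
  intro evidence _
  unfold Spec_is_critical_employment_py is_critical_employment_py is_critical_employment_py_alt
  rw [pv_aloop_eq]
  rw [Bool.eq_iff_iff, List.any_eq_true, List.any_eq_true]
  constructor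
  · rintro ⟨item, hitem, h⟩
    rw [List.any_eq_true] at h
    obtain ⟨kw, hkw, hin⟩ := h
    exact ⟨kw, hkw, (pv_isIn_text kw (pv_all_keywords_ok kw hkw) evidence).mpr
      ⟨item, hitem, hin⟩⟩
  · rintro ⟨kw, hkw, hin⟩
    obtain ⟨item, hitem, h⟩ := (pv_isIn_text kw (pv_all_keywords_ok kw hkw) evidence).mp hin
    exact ⟨item, hitem, List.any_eq_true.mpr ⟨kw, hkw, h⟩⟩
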